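-- pv_equiv track=rewrite | github.com/stathiskal11/driver-sensor-recognition | scripts/analyze_label_candidates.py | build_next_positive_index
-- ===== SOURCE A (Python) =====
-- def build_next_positive_index(event_flags: list[bool]) -> list[int | None]:
--     """Για κάθε timestep βρίσκει το επόμενο positive timestep."""
--     next_positive: list[int | None] = [None] * len(event_flags)
--     next_seen: int | None = None
--     for idx in range(len(event_flags) - 1, -1, -1):
--         if event_flags[idx]:
--             next_seen = idx
--         next_positive[idx] = next_seen
--     return next_positive
-- ===== SOURCE B (Python) =====
-- def build_next_positive_index(event_flags: list[bool]) -> list[int | None]: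
--     """For each timestep find the next positive timestep (forward two-pointer)."""
--     positives = [i for i, f in enumerate(event_flags) if f]
--     n = len(event_flags)
--     next_positive: list[int | None] = [None] * n
--     p = 0
--     for idx in range(n):
--         while p < len(positives) and positives[p] < idx:
--             p += 1
--         next_positive[idx] = positives[p] if p < len(positives) else None
--     return next_positive
-- ===== Notes on version B (the rewrite author's own statement) =====
-- stated objective: alternative
-- what changed: Replaces A's backward sweep carrying a running next-seen value with a forward two-pointer pass over a precomputed table of positive indices.
import Mathlib
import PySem

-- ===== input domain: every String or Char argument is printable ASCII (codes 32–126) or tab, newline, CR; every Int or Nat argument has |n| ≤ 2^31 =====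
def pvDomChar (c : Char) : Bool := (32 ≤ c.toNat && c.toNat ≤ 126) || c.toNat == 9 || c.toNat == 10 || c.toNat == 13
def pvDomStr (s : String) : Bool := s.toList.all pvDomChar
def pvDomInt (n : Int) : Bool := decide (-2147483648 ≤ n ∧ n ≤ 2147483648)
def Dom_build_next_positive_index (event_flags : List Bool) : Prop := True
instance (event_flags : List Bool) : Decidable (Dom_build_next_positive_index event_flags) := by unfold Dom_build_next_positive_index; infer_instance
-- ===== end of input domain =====

-- B replaces A's backward sweep (running next-seen value) by a forward two-pointer pass
-- over a precomputed table of positive indices; same O(n) cost, different traversal.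

-- ===== PORT A =====
-- enumerate with Int indices starting at b (for idx / event_flags[idx])
def pvEnumFrom (b : Int) : List Bool → List (Int × Bool)
  | [] => []
  | f :: rest => (b, f) :: pvEnumFrom (b + 1) rest

-- one iteration of A's backward loop: update next_seen, record it at idx.
-- The right-to-left for-loop filling next_positive is the foldr over the enumeration,
-- carrying (list built so far, next_seen).
def pvAStep (p : Int × Bool) (st : List (Option Int) × Option Int) :
    List (Option Int) × Option Int :=
  let seen := if p.2 then some p.1 else st.2
  (seen :: st.1, seen)

def build_next_positive_index (event_flags : List Bool) : List (Option Int) :=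
  ((pvEnumFrom 0 event_flags).foldr pvAStep ([], none)).1

-- ===== PORT B =====
-- positives = [i for i, f in enumerate(event_flags) if f]
def pvPosFrom (b : Int) : List Bool → List Int
  | [] => []
  | f :: rest => if f then b :: pvPosFrom (b + 1) rest else pvPosFrom (b + 1) rest

-- forward loop over idx; the cursor p into positives is the remaining suffix of the
-- table, and the inner while-loop advancing p is dropWhile (· < idx).
def pvAltGo (ps : List Int) (idx : Int) : Nat → List (Option Int)
  | 0 => []
  | Nat.succ k =>
    let ps' := ps.dropWhile (fun j => decide (j < idx))
    ps'.head? :: pvAltGo ps' (idx + 1) k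

def build_next_positive_index_alt (event_flags : List Bool) : List (Option Int) :=
  pvAltGo (pvPosFrom 0 event_flags) 0 event_flags.length

-- ===== PRECONDITION & SPEC =====
def Spec_build_next_positive_index (event_flags : List Bool) (out : List (Option Int)) : Prop := out = build_next_positive_index_alt event_flags
instance (event_flags : List Bool) (out : List (Option Int)) : Decidable (Spec_build_next_positive_index event_flags out) := by unfold Spec_build_next_positive_index; infer_instance

-- ===== CLAIM (what is proved, stated in full; the proofs are below) =====
def Claim_equal_build_next_positive_index : Prop := ∀ (event_flags : List Bool), Dom_build_next_positive_index event_flags → Spec_build_next_positive_index event_flags (build_next_positive_index event_flags)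

-- ===== LEMMAS AND PROOFS =====

-- first index ≥ b holding a positive flag (the common characterisation)
def pvFirstFrom (b : Int) : List Bool → Option Int
  | [] => none
  | f :: rest => if f then some b else pvFirstFrom (b + 1) rest

def pvSpecL (b : Int) : List Bool → List (Option Int)
  | [] => []
  | f :: rest => pvFirstFrom b (f :: rest) :: pvSpecL (b + 1) rest

theorem pvA_foldr (flags : List Bool) : ∀ b : Int,
    (pvEnumFrom b flags).foldr pvAStep ([], none) = (pvSpecL b flags, pvFirstFrom b flags) := by
  induction flags with
  | nil => intro b; simp [pvEnumFrom, pvSpecL, pvFirstFrom]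
  | cons f rest ih =>
    intro b
    simp [pvEnumFrom, pvSpecL, pvFirstFrom, pvAStep, ih (b + 1)]

theorem pvPos_ge (flags : List Bool) : ∀ b x : Int, x ∈ pvPosFrom b flags → b ≤ x := by
  induction flags with
  | nil => intro b x h; simp [pvPosFrom] at h
  | cons f rest ih =>
    intro b x h
    by_cases hf : f
    · simp [pvPosFrom, hf] at h
      rcases h with h | h
      · omega
      · have := ih (b + 1) x h; omega
    · simp [pvPosFrom, hf] at h
      have := ih (b + 1) x h; omega

theorem pvPos_dropWhile_self (flags : List Bool) (b : Int) :
    (pvPosFrom b flags).dropWhile (fun j => decide (j < b)) = pvPosFrom b flags := by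
  cases h : pvPosFrom b flags with
  | nil => simp
  | cons x xs =>
    have hx : b ≤ x := pvPos_ge flags b x (by rw [h]; exact List.mem_cons_self)
    simp [show ¬ (x < b) by omega]

theorem pvPos_head (flags : List Bool) : ∀ b : Int,
    (pvPosFrom b flags).head? = pvFirstFrom b flags := by
  induction flags with
  | nil => intro b; simp [pvPosFrom, pvFirstFrom]
  | cons f rest ih =>
    intro b
    by_cases hf : f <;> simp [pvPosFrom, pvFirstFrom, hf, ih (b + 1)]

theorem pvAltGo_congr : ∀ (k : Nat) (ps qs : List Int) (i : Int),
    ps.dropWhile (fun j => decide (j < i)) = qs.dropWhile (fun j => decide (j < i)) →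
    pvAltGo ps i k = pvAltGo qs i k := by
  intro k
  cases k with
  | zero => intro ps qs i _; rfl
  | succ k => intro ps qs i h; simp [pvAltGo, h]

theorem pvPos_dropWhile_succ (flags : List Bool) (f : Bool) (b : Int) :
    (pvPosFrom b (f :: flags)).dropWhile (fun j => decide (j < b + 1)) =
    (pvPosFrom (b + 1) flags).dropWhile (fun j => decide (j < b + 1)) := by
  by_cases hf : f <;> simp [pvPosFrom, hf]

theorem pvB_go (flags : List Bool) : ∀ b : Int,
    pvAltGo (pvPosFrom b flags) b flags.length = pvSpecL b flags := by
  induction flags with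
  | nil => intro b; rfl
  | cons f rest ih =>
    intro b
    show pvAltGo (pvPosFrom b (f :: rest)) b (rest.length + 1) = pvSpecL b (f :: rest)
    rw [pvAltGo, pvPos_dropWhile_self]
    rw [pvPos_head, pvSpecL]
    congr 1
    calc pvAltGo (pvPosFrom b (f :: rest)) (b + 1) rest.length
        = pvAltGo (pvPosFrom (b + 1) rest) (b + 1) rest.length :=
          pvAltGo_congr _ _ _ _ (pvPos_dropWhile_succ rest f b)
      _ = pvSpecL (b + 1) rest := ih (b + 1)

theorem pvA_eq_spec (flags : List Bool) : build_next_positive_index flags = pvSpecL 0 flags := by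
  simp [build_next_positive_index, pvA_foldr]

theorem pvB_eq_spec (flags : List Bool) :
    build_next_positive_index_alt flags = pvSpecL 0 flags := by
  simp [build_next_positive_index_alt, pvB_go]

-- ===== VERDICT (by name: the statement is the Claim_ definition above) =====
theorem build_next_positive_index_spec : Claim_equal_build_next_positive_index := by
  intro flags _
  unfold Spec_build_next_positive_index
  rw [pvA_eq_spec, pvB_eq_spec]
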